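-- pv_equiv track=rewrite | github.com/sadelover/dompyite | siteinterface/ReportTool.py | alphaNumSplit
-- ===== SOURCE A (Python) =====
-- def alpha2num(str):
--     index = 1
--     length = len(str)
--     sum = 0
--     for i in range(length):
--         sum += ((ord(str[length - i - 1]) - ord('A') + 1) * index)
--         index *= 26
--     return sum
--
-- def alphaNumSplit(str):
--     length = len(str)
--
--     for i in range(length):
--         if str[i].isdigit():
--             alphastr = str[0:i]
--             numstr = str[i:]
--             break
--     return alpha2num(alphastr), int(numstr)
-- ===== SOURCE B (Python) =====
-- def _val(a):
--     # value of 'a' as a bijective base-26 numeral, by divide and conquer: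
--     # val(left ++ right) == val(left) * 26**len(right) + val(right)
--     if not a:
--         return 0
--     if len(a) == 1:
--         return ord(a) - ord('A') + 1
--     m = len(a) // 2
--     return _val(a[:m]) * 26 ** (len(a) - m) + _val(a[m:])
--
-- def alphaNumSplit(str):
--     i = next(k for k, c in enumerate(str) if c.isdigit())
--     return _val(str[:i]), int(str[i:])
-- ===== Notes on version B (the rewrite author's own statement) =====
-- stated objective: alternative
-- what changed: Replaces A's break-out split loop plus a linear backward power-accumulator scan with a generator-expression index search and a recursive divide-and-conquer evaluator of the alpha prefix (val(s) = val(left)*26**len(right) + val(right), halving at each step), correct because bijective base-26 value is compositional over concatenation.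
import Mathlib
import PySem

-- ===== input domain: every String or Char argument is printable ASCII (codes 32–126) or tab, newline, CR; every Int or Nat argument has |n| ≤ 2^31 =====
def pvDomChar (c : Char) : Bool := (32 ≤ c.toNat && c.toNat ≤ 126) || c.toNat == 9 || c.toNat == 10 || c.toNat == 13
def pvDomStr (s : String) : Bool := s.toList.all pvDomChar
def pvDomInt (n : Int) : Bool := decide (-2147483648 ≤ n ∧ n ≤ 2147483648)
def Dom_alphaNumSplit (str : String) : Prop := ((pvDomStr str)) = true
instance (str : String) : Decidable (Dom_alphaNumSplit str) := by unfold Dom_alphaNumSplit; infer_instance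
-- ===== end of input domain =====

-- B replaces A's split loop + linear backward power-accumulator alpha2num with a generator-style
-- index search and a recursive divide-and-conquer bijective-base-26 evaluator of the prefix.

-- ===== PORT A =====
-- alpha2num: backward scan, explicit state (index, sum); sum += (ord(s[len-i-1]) - ord('A') + 1) * index; index *= 26
def pvAlpha2num (cs : List Char) : Int :=
  ((PySem.List.pyRange 0 (cs.length : Int) 1).foldl
    (fun (st : Int × Int) i =>
      (st.1 * 26, st.2 + (((PySem.List.pyGetD cs ((cs.length : Int) - i - 1) ' ').toNat : Int) - 65 + 1) * st.1))
    (1, 0)).2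

-- the split loop: scan for the first digit, keeping the prefix read so far; none = no digit (Python: NameError)
def pvSplitA (pre : List Char) : List Char → Option (List Char × List Char)
  | [] => none
  | c :: rest =>
    if PySem.Chars.isdigit c then some (pre, c :: rest)
    else pvSplitA (pre ++ [c]) rest

def alphaNumSplit (str : String) : Int × Int :=
  match pvSplitA [] str.toList with
  | some (al, nu) => (pvAlpha2num al, (PySem.Int.ofChars? nu).getD 0)
  | none => (0, 0)  -- Python raises NameError here; excluded by Pre_

-- ===== PORT B =====
-- _val: divide-and-conquer evaluation of the bijective base-26 numeral
def pvValB (cs : List Char) : Int :=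
  if cs.length = 0 then 0
  else if cs.length = 1 then ((cs.headD ' ').toNat : Int) - 65 + 1
  else
    let m := cs.length / 2
    pvValB (cs.take m) * 26 ^ (cs.length - m) + pvValB (cs.drop m)
termination_by cs.length
decreasing_by
  · simp only [List.length_take]; omega
  · simp only [List.length_drop]; omega

def alphaNumSplit_alt (str : String) : Int × Int :=
  let cs := str.toList
  let i := cs.findIdx PySem.Chars.isdigit   -- next(k for k, c in enumerate(str) if c.isdigit())
  (pvValB (cs.take i), (PySem.Int.ofChars? (cs.drop i)).getD 0)

-- ===== PRECONDITION & SPEC =====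
-- Pre_ excludes exactly the inputs where Python A raises: strings with no digit (NameError)
-- and strings whose suffix from the first digit is not a valid int literal (ValueError).
def Pre_alphaNumSplit (str : String) : Prop :=
  (str.toList.any PySem.Chars.isdigit) = true ∧
  (PySem.Int.ofChars? (str.toList.dropWhile (fun c => !PySem.Chars.isdigit c))).isSome = true
instance (str : String) : Decidable (Pre_alphaNumSplit str) := by unfold Pre_alphaNumSplit; infer_instance
def pvWitness_alphaNumSplit : String := "AB12"

def Spec_alphaNumSplit (str : String) (out : Int × Int) : Prop := out = alphaNumSplit_alt str
instance (str : String) (out : Int × Int) : Decidable (Spec_alphaNumSplit str out) := by unfold Spec_alphaNumSplit; infer_instance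

-- ===== CLAIM (what is proved, stated in full; the proofs are below) =====
def Claim_equal_alphaNumSplit : Prop := ∀ (str : String), Dom_alphaNumSplit str → Pre_alphaNumSplit str → Spec_alphaNumSplit str (alphaNumSplit str)

-- ===== LEMMAS AND PROOFS =====

-- the split loop returns (prefix-so-far ++ takeWhile not-digit, dropWhile not-digit) when a digit exists
theorem pvSplitA_eq (cs : List Char) (pre : List Char)
    (h : cs.any PySem.Chars.isdigit = true) :
    pvSplitA pre cs =
      some (pre ++ cs.takeWhile (fun c => !PySem.Chars.isdigit c),
            cs.dropWhile (fun c => !PySem.Chars.isdigit c)) := by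
  induction cs generalizing pre with
  | nil => simp at h
  | cons c rest ih =>
    by_cases hc : PySem.Chars.isdigit c = true
    · simp [pvSplitA, hc, List.takeWhile, List.dropWhile]
    · simp only [List.any_cons, hc, Bool.false_or] at h
      simp [pvSplitA, hc, List.takeWhile, List.dropWhile, ih _ h]

theorem take_findIdx_eq_takeWhile (cs : List Char) (p : Char → Bool) :
    cs.take (cs.findIdx p) = cs.takeWhile (fun c => !p c) := by
  induction cs with
  | nil => simp
  | cons c rest ih =>
    by_cases hc : p c = true
    · simp [List.findIdx_cons, hc, List.takeWhile]
    · simp [List.findIdx_cons, hc, List.takeWhile, ih]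

theorem drop_findIdx_eq_dropWhile (cs : List Char) (p : Char → Bool) :
    cs.drop (cs.findIdx p) = cs.dropWhile (fun c => !p c) := by
  induction cs with
  | nil => simp
  | cons c rest ih =>
    by_cases hc : p c = true
    · simp [List.findIdx_cons, hc, List.dropWhile]
    · simp [List.findIdx_cons, hc, List.dropWhile, ih]

-- Horner fold shifted start
theorem horner_shift (cs : List Char) (a : Int) :
    cs.foldl (fun a c => a * 26 + ((c.toNat : Int) - 65 + 1)) a
      = a * 26 ^ cs.length + cs.foldl (fun a c => a * 26 + ((c.toNat : Int) - 65 + 1)) 0 := by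
  induction cs generalizing a with
  | nil => simp
  | cons c rest ih =>
    simp only [List.foldl_cons, List.length_cons]
    rw [ih (a * 26 + _), ih (0 * 26 + _)]
    ring

-- the reversed power-accumulator fold computes (26^len, Horner value)
theorem foldr_powacc (cs : List Char) :
    cs.foldr (fun c (st : Int × Int) =>
        (st.1 * 26, st.2 + (((c.toNat : Int)) - 65 + 1) * st.1)) (1, 0)
      = (26 ^ cs.length, cs.foldl (fun a c => a * 26 + ((c.toNat : Int) - 65 + 1)) 0) := by
  induction cs with
  | nil => simp
  | cons c rest ih =>
    simp only [List.foldr_cons, ih, List.length_cons, List.foldl_cons]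
    rw [horner_shift rest (0 * 26 + _)]
    simp only [Prod.mk.injEq]
    constructor <;> ring

-- A's alpha2num equals the Horner value of the list
theorem pvAlpha2num_eq (cs : List Char) :
    pvAlpha2num cs = cs.foldl (fun a c => a * 26 + ((c.toNat : Int) - 65 + 1)) 0 := by
  unfold pvAlpha2num
  have hlen : (cs.length : Int) = PySem.List.len cs.reverse := by
    simp [PySem.List.len_eq]
  have hcongr :
      (PySem.List.pyRange 0 (cs.length : Int) 1).foldl
        (fun (st : Int × Int) i =>
          (st.1 * 26, st.2 + (((PySem.List.pyGetD cs ((cs.length : Int) - i - 1) ' ').toNat : Int) - 65 + 1) * st.1))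
        (1, 0)
      = (PySem.List.pyRange 0 (cs.length : Int) 1).foldl
        (fun (st : Int × Int) i =>
          (st.1 * 26, st.2 + (((PySem.List.pyGetD cs.reverse i ' ').toNat : Int) - 65 + 1) * st.1))
        (1, 0) := by
    apply PySem.List.foldl_congr_mem
    intro acc x hx
    rw [PySem.List.mem_pyRange_one] at hx
    have h0 : (0:Int) ≤ (cs.length : Int) - x - 1 := by omega
    rw [PySem.List.pyGetD_of_nonneg _ _ h0, PySem.List.pyGetD_of_nonneg _ _ hx.1]
    congr 1
    have hxlt : x.toNat < cs.length := by omega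
    have : ((cs.length : Int) - x - 1).toNat = cs.length - 1 - x.toNat := by omega
    rw [this]
    rw [List.getD_eq_getElem?_getD, List.getD_eq_getElem?_getD]
    rw [List.getElem?_reverse hxlt]
  rw [hcongr, hlen]
  rw [PySem.List.foldl_pyRange_zero_pyGetD cs.reverse ' '
        (fun (st : Int × Int) c => (st.1 * 26, st.2 + (((c.toNat : Int)) - 65 + 1) * st.1)) (1, 0)]
  rw [List.foldl_reverse]
  have := foldr_powacc cs
  simp only [this]

-- the Horner value is compositional over concatenation
theorem horner_append (xs ys : List Char) :
    (xs ++ ys).foldl (fun a c => a * 26 + ((c.toNat : Int) - 65 + 1)) 0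
      = xs.foldl (fun a c => a * 26 + ((c.toNat : Int) - 65 + 1)) 0 * 26 ^ ys.length
        + ys.foldl (fun a c => a * 26 + ((c.toNat : Int) - 65 + 1)) 0 := by
  rw [List.foldl_append, horner_shift]

-- B's divide-and-conquer evaluator computes the Horner value
theorem pvValB_eq_aux (n : ℕ) : ∀ cs : List Char, cs.length ≤ n →
    pvValB cs = cs.foldl (fun a c => a * 26 + ((c.toNat : Int) - 65 + 1)) 0 := by
  induction n with
  | zero =>
    intro cs h
    have : cs = [] := List.eq_nil_of_length_eq_zero (Nat.le_zero.mp h)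
    subst this; rw [pvValB]; simp
  | succ n ih =>
    intro cs h
    rw [pvValB]
    by_cases h0 : cs.length = 0
    · have : cs = [] := List.eq_nil_of_length_eq_zero h0
      subst this; simp
    · by_cases h1 : cs.length = 1
      · simp only [h1, if_true]
        match cs, h1 with
        | [c], _ => simp
      · simp only [h0, h1, if_false]
        have h2 : 2 ≤ cs.length := by omega
        have hm1 : cs.length / 2 ≤ cs.length := Nat.div_le_self _ _
        have ht : (cs.take (cs.length / 2)).length ≤ n := by
          simp only [List.length_take]; omega
        have hd : (cs.drop (cs.length / 2)).length ≤ n := by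
          simp only [List.length_drop]; omega
        rw [ih _ ht, ih _ hd]
        have hsplit := List.take_append_drop (cs.length / 2) cs
        conv_rhs => rw [← hsplit]
        rw [horner_append]
        simp only [List.length_drop]

theorem pvValB_eq (cs : List Char) :
    pvValB cs = cs.foldl (fun a c => a * 26 + ((c.toNat : Int) - 65 + 1)) 0 :=
  pvValB_eq_aux cs.length cs (le_refl _)

-- ===== VERDICT (by name: the statement is the Claim_ definition above) =====
theorem alphaNumSplit_spec : Claim_equal_alphaNumSplit := by
  intro str _ hpre
  obtain ⟨hany, _⟩ := hpre
  unfold Spec_alphaNumSplit alphaNumSplit alphaNumSplit_alt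
  rw [pvSplitA_eq _ [] hany]
  simp only [List.nil_append]
  rw [take_findIdx_eq_takeWhile, drop_findIdx_eq_dropWhile, pvAlpha2num_eq, pvValB_eq]
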